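-- pv_equiv track=rewrite | github.com/wangxiancao/xhs_note | scripts/title_compliance_check.py | collect_matches
-- ===== SOURCE A (Python) =====
-- def collect_matches(title: str, categories: dict[str, list[str]]) -> list[tuple[str, str]]:
--     seen = set()
--     hits: list[tuple[str, str]] = []
--     for category, words in categories.items():
--         for word in words:
--             if word and word in title and (category, word) not in seen:
--                 seen.add((category, word))
--                 hits.append((category, word))
--     return hits
-- ===== SOURCE B (Python) =====
-- def collect_matches(title: str, categories: dict[str, list[str]]) -> list[tuple[str, str]]:
--     # Hash every title substring whose length is a needed word length, then
--     # answer each word by one O(1) set lookup; dedupe via dict insertion order.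
--     lengths = {len(w) for words in categories.values() for w in words if w}
--     subs = set()
--     n = len(title)
--     for L in lengths:
--         for i in range(n - L + 1):
--             subs.add(title[i:i + L])
--     out = {}
--     for category, words in categories.items():
--         for w in words:
--             if w in subs:
--                 out[(category, w)] = None
--     return list(out)
-- ===== Notes on version B (the rewrite author's own statement) =====
-- stated objective: faster
-- what changed: Instead of scanning the title once per word ('word in title'), B hashes all title substrings of the needed word lengths into one set and answers every word by a single O(1) lookup, deduplicating via dict insertion order.
import Mathlib
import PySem

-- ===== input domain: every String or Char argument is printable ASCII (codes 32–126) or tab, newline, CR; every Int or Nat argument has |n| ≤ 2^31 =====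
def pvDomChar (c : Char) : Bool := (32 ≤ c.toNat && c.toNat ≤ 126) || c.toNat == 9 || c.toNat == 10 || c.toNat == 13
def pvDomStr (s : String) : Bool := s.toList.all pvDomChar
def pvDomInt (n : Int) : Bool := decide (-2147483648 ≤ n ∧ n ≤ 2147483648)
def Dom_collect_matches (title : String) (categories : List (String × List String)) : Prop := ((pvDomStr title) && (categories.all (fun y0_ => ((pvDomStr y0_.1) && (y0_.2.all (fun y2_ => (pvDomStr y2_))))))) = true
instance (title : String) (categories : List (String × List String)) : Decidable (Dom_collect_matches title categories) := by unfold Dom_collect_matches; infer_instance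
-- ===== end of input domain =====

-- B replaces A's per-word substring scans by one hashed set of title substrings
-- of the needed lengths, answering each word with a single set lookup (objective: faster).

-- ===== PORT A =====
def collect_matches (title : String) (categories : List (String × List String)) : List (String × String) :=
  (categories.foldl (fun (st : PySem.Set (String × String) × List (String × String)) cw =>
    cw.2.foldl (fun st word =>
      if (word != "") && PySem.Str.isIn word title && !(st.1.contains (cw.1, word)) then
        (st.1.add (cw.1, word), st.2 ++ [(cw.1, word)])
      else st) st) (PySem.Set.empty, [])).2

-- ===== PORT B =====
def collect_matches_alt (title : String) (categories : List (String × List String)) : List (String × String) :=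
  let lengths : PySem.Set Int :=
    PySem.Set.ofList ((categories.map Prod.snd).flatMap (fun ws =>
      (ws.filter (fun w => w != "")).map (fun w => PySem.Str.len w)))
  let n : Int := PySem.Str.len title
  let subs : PySem.Set String :=
    lengths.foldl (fun subs L =>
      (PySem.List.pyRange 0 (n - L + 1) 1).foldl (fun subs i =>
        subs.add (PySem.Str.slice title (some i) (some (i + L)))) subs) PySem.Set.empty
  let out : PySem.Dict (String × String) (Option Unit) :=
    categories.foldl (fun out cw =>
      cw.2.foldl (fun out w =>
        if subs.contains w then out.insert (cw.1, w) none else out) out) PySem.Dict.empty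
  out.keys

-- ===== PRECONDITION & SPEC =====
def Spec_collect_matches (title : String) (categories : List (String × List String)) (out : List (String × String)) : Prop := out = collect_matches_alt title categories
instance (title : String) (categories : List (String × List String)) (out : List (String × String)) : Decidable (Spec_collect_matches title categories out) := by unfold Spec_collect_matches; infer_instance

-- ===== CLAIM (what is proved, stated in full; the proofs are below) =====
def Claim_equal_collect_matches : Prop := ∀ (title : String) (categories : List (String × List String)), Dom_collect_matches title categories → Spec_collect_matches title categories (collect_matches title categories)

-- ===== LEMMAS AND PROOFS =====

-- proof-only name for B's substring set
def pvSubs (title : String) (lens : List Int) : PySem.Set String :=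
  lens.foldl (fun subs L =>
    (PySem.List.pyRange 0 (PySem.Str.len title - L + 1) 1).foldl (fun subs i =>
      subs.add (PySem.Str.slice title (some i) (some (i + L)))) subs) PySem.Set.empty

-- membership after folding `Set.add` over a list
theorem pv_mem_foldl_add {α β : Type} [BEq β] [LawfulBEq β] (l : List α) (s : PySem.Set β)
    (f : α → β) (x : β) :
    x ∈ l.foldl (fun s a => s.add (f a)) s ↔ x ∈ s ∨ ∃ a ∈ l, x = f a := by
  induction l generalizing s with
  | nil => simp
  | cons a t ih =>
    simp only [List.foldl_cons, ih, PySem.Set.mem_add, List.mem_cons]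
    constructor
    · rintro ((h | h) | ⟨b, hb, rfl⟩)
      · exact Or.inl h
      · exact Or.inr ⟨a, Or.inl rfl, h⟩
      · exact Or.inr ⟨b, Or.inr hb, rfl⟩
    · rintro (h | ⟨b, (rfl | hb), rfl⟩)
      · exact Or.inl (Or.inl h)
      · exact Or.inl (Or.inr rfl)
      · exact Or.inr ⟨b, hb, rfl⟩

theorem pv_mem_subs_aux (title : String) (lens : List Int) (s : PySem.Set String) (x : String) :
    x ∈ lens.foldl (fun subs L =>
        (PySem.List.pyRange 0 (PySem.Str.len title - L + 1) 1).foldl (fun subs i =>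
          subs.add (PySem.Str.slice title (some i) (some (i + L)))) subs) s
      ↔ x ∈ s ∨ ∃ L ∈ lens, ∃ i ∈ PySem.List.pyRange 0 (PySem.Str.len title - L + 1) 1,
          x = PySem.Str.slice title (some i) (some (i + L)) := by
  induction lens generalizing s with
  | nil => simp
  | cons L t ih =>
    simp only [List.foldl_cons, ih, pv_mem_foldl_add, List.mem_cons]
    constructor
    · rintro ((h | ⟨i, hi, rfl⟩) | ⟨M, hM, i, hi, rfl⟩)
      · exact Or.inl h
      · exact Or.inr ⟨L, Or.inl rfl, i, hi, rfl⟩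
      · exact Or.inr ⟨M, Or.inr hM, i, hi, rfl⟩
    · rintro (h | ⟨M, (rfl | hM), i, hi, rfl⟩)
      · exact Or.inl (Or.inl h)
      · exact Or.inl (Or.inr ⟨i, hi, rfl⟩)
      · exact Or.inr ⟨M, hM, i, hi, rfl⟩

theorem pv_mem_subs (title : String) (lens : List Int) (x : String) :
    x ∈ pvSubs title lens
      ↔ ∃ L ∈ lens, ∃ i ∈ PySem.List.pyRange 0 (PySem.Str.len title - L + 1) 1,
          x = PySem.Str.slice title (some i) (some (i + L)) := by
  rw [pvSubs, pv_mem_subs_aux]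
  simp [PySem.Set.empty]

theorem pv_slice_take (title : String) (j Lnat : Nat) :
    (PySem.Str.slice title (some (j : Int)) (some ((j : Int) + (Lnat : Int)))).toList
      = (title.toList.drop j).take Lnat := by
  rw [PySem.Str.toList_slice, PySem.Chars.slice_eq_listSlice, PySem.List.slice_natCast_add]

theorem pv_toList_ne_nil (w : String) (h : w ≠ "") : w.toList ≠ [] := by
  intro hnil
  exact h (String.toList_inj.mp (by simp [hnil]))

theorem pv_mem_subs_char (title : String) (lens : List Int)
    (hpos : ∀ L ∈ lens, 1 ≤ L) (w : String) (hw : w ≠ "" → PySem.Str.len w ∈ lens) :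
    w ∈ pvSubs title lens ↔ (w ≠ "" ∧ PySem.Str.isIn w title = true) := by
  rw [pv_mem_subs]
  constructor
  · rintro ⟨L, hL, i, hi, rfl⟩
    have h1 := hpos L hL
    rw [PySem.List.mem_pyRange_one] at hi
    obtain ⟨hi0, hilt⟩ := hi
    obtain ⟨j, rfl⟩ : ∃ j : Nat, i = (j : Int) := ⟨i.toNat, (Int.toNat_of_nonneg hi0).symm⟩
    obtain ⟨Lnat, rfl⟩ : ∃ m : Nat, L = (m : Int) := ⟨L.toNat, (Int.toNat_of_nonneg (by omega)).symm⟩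
    rw [PySem.Str.len_eq] at hilt
    have hT : title.toList.length = title.length := by simp
    have hjl : j + Lnat ≤ title.toList.length := by
      omega
    have htl := pv_slice_take title j Lnat
    have hlen : ((PySem.Str.slice title (some (j : Int)) (some ((j : Int) + (Lnat : Int)))).toList).length = Lnat := by
      rw [htl]; simp; omega
    refine ⟨?_, ?_⟩
    · intro hemp
      rw [hemp] at hlen
      simp at hlen
      omega
    · rw [PySem.Str.isIn_eq, ← PySem.Chars.exists_prefix_drop_iff_isIn]
      exact ⟨j, by rw [htl]; exact List.take_prefix _ _⟩
  · rintro ⟨hne, hin⟩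
    have hlw := hw hne
    have hwlen : 1 ≤ w.toList.length := by
      have := pv_toList_ne_nil w hne
      cases h : w.toList with
      | nil => exact absurd h this
      | cons a t => simp
    rw [PySem.Str.isIn_eq, ← PySem.Chars.exists_prefix_drop_iff_isIn] at hin
    obtain ⟨j, hpre⟩ := hin
    have hll := hpre.length_le
    rw [List.length_drop] at hll
    have hT : title.toList.length = title.length := by simp
    refine ⟨PySem.Str.len w, hlw, (j : Int), ?_, ?_⟩
    · rw [PySem.List.mem_pyRange_one, PySem.Str.len_eq, PySem.Str.len_eq]
      omega
    · rw [PySem.Str.len_eq, ← String.toList_inj, pv_slice_take title j w.toList.length]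
      exact List.prefix_iff_eq_take.mp hpre

theorem pv_contains_subs (title : String) (lens : List Int)
    (hpos : ∀ L ∈ lens, 1 ≤ L) (w : String) (hw : w ≠ "" → PySem.Str.len w ∈ lens) :
    (pvSubs title lens).contains w = ((w != "") && PySem.Str.isIn w title) := by
  rw [Bool.eq_iff_iff, PySem.Set.contains_iff, pv_mem_subs_char title lens hpos w hw]
  simp [Bool.and_eq_true, bne_iff_ne]

-- inner loop: A's (seen, hits) and B's dict march in sync over one word list
theorem pv_inner (title : String) (lens : List Int) (cat : String) (ws : List String)
    (seen : PySem.Set (String × String)) (hits : List (String × String))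
    (d : PySem.Dict (String × String) (Option Unit))
    (hseen : ∀ k, seen.contains k = d.contains k) (hhits : hits = d.keys)
    (hch : ∀ w ∈ ws, (pvSubs title lens).contains w = ((w != "") && PySem.Str.isIn w title)) :
    (ws.foldl (fun st word =>
      if (word != "") && PySem.Str.isIn word title && !(st.1.contains (cat, word)) then
        (st.1.add (cat, word), st.2 ++ [(cat, word)])
      else st) (seen, hits)).2
    = (ws.foldl (fun out w =>
        if (pvSubs title lens).contains w then out.insert (cat, w) none else out) d).keys
    ∧ ∀ k, ((ws.foldl (fun st word =>
      if (word != "") && PySem.Str.isIn word title && !(st.1.contains (cat, word)) then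
        (st.1.add (cat, word), st.2 ++ [(cat, word)])
      else st) (seen, hits)).1).contains k
      = ((ws.foldl (fun out w =>
        if (pvSubs title lens).contains w then out.insert (cat, w) none else out) d)).contains k := by
  induction ws generalizing seen hits d with
  | nil => exact ⟨hhits, hseen⟩
  | cons w rest ih =>
    have hcw := hch w List.mem_cons_self
    have hchrest : ∀ w' ∈ rest, (pvSubs title lens).contains w' = ((w' != "") && PySem.Str.isIn w' title) :=
      fun w' h => hch w' (List.mem_cons_of_mem _ h)
    simp only [List.foldl_cons, hcw]
    cases hb : ((w != "") && PySem.Str.isIn w title) with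
    | false =>
      simp only [Bool.false_and, Bool.false_eq_true, if_false]
      exact ih seen hits d hseen hhits hchrest
    | true =>
      simp only [Bool.true_and, if_true]
      cases hs : seen.contains (cat, w) with
      | true =>
        have hd : d.contains (cat, w) = true := (hseen _).symm.trans hs
        have hseen' : ∀ k, seen.contains k = (d.insert (cat, w) none).contains k := by
          intro k
          rw [PySem.Dict.contains_insert]
          cases hk : (k == (cat, w)) with
          | true =>
            have hke : k = (cat, w) := eq_of_beq hk
            subst hke
            rw [Bool.true_or]
            exact hs
          | false =>
            rw [Bool.false_or]
            exact hseen k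
        have hhits' : hits = (d.insert (cat, w) none).keys := by
          rw [PySem.Dict.keys_insert_of_contains d none hd]; exact hhits
        simp only [Bool.not_true, Bool.false_eq_true, if_false]
        exact ih seen hits (d.insert (cat, w) none) hseen' hhits' hchrest
      | false =>
        have hd : d.contains (cat, w) = false := (hseen _).symm.trans hs
        have hseen' : ∀ k, (seen.add (cat, w)).contains k = (d.insert (cat, w) none).contains k := by
          intro k
          rw [PySem.Dict.contains_insert, Bool.eq_iff_iff, PySem.Set.contains_iff, PySem.Set.mem_add]
          constructor
          · rintro (h | rfl)
            · have h2 : d.contains k = true := by rw [← hseen k, PySem.Set.contains_iff]; exact h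
              rw [h2, Bool.or_true]
            · simp
          · intro h
            cases hk : (k == (cat, w)) with
            | true => exact Or.inr (eq_of_beq hk)
            | false =>
              rw [hk, Bool.false_or] at h
              exact Or.inl ((PySem.Set.contains_iff _ _).mp ((hseen k).trans h))
        have hhits' : hits ++ [(cat, w)] = (d.insert (cat, w) none).keys := by
          rw [PySem.Dict.keys_insert_of_not_contains d none hd, hhits]
        simp only [Bool.not_false, if_true]
        exact ih (seen.add (cat, w)) (hits ++ [(cat, w)]) (d.insert (cat, w) none) hseen' hhits' hchrest

-- outer loop
theorem pv_outer (title : String) (lens : List Int) (cats : List (String × List String))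
    (seen : PySem.Set (String × String)) (hits : List (String × String))
    (d : PySem.Dict (String × String) (Option Unit))
    (hseen : ∀ k, seen.contains k = d.contains k) (hhits : hits = d.keys)
    (hch : ∀ p ∈ cats, ∀ w ∈ p.2, (pvSubs title lens).contains w = ((w != "") && PySem.Str.isIn w title)) :
    (cats.foldl (fun (st : PySem.Set (String × String) × List (String × String)) cw =>
      cw.2.foldl (fun st word =>
        if (word != "") && PySem.Str.isIn word title && !(st.1.contains (cw.1, word)) then
          (st.1.add (cw.1, word), st.2 ++ [(cw.1, word)])
        else st) st) (seen, hits)).2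
    = (cats.foldl (fun out cw =>
        cw.2.foldl (fun out w =>
          if (pvSubs title lens).contains w then out.insert (cw.1, w) none else out) out) d).keys := by
  induction cats generalizing seen hits d with
  | nil => exact hhits
  | cons p rest ih =>
    simp only [List.foldl_cons]
    obtain ⟨h1, h2⟩ := pv_inner title lens p.1 p.2 seen hits d hseen hhits
      (hch p List.mem_cons_self)
    exact ih _ _ _ h2 h1 (fun q hq => hch q (List.mem_cons_of_mem _ hq))

-- ===== VERDICT (by name: the statement is the Claim_ definition above) =====
theorem collect_matches_spec : Claim_equal_collect_matches := by
  unfold Claim_equal_collect_matches Spec_collect_matches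
  intro title categories _
  unfold collect_matches collect_matches_alt
  refine pv_outer title
    (PySem.Set.ofList ((categories.map Prod.snd).flatMap (fun ws =>
      (ws.filter (fun w => w != "")).map (fun w => PySem.Str.len w))))
    categories PySem.Set.empty [] PySem.Dict.empty ?_ ?_ ?_
  · intro k
    simp [PySem.Set.empty, PySem.Set.contains_eq_listContains, PySem.Dict.contains_empty]
  · simp [PySem.Dict.keys_empty]
  · intro p hp w hwmem
    apply pv_contains_subs
    · intro L hL
      rw [PySem.Set.mem_ofList] at hL
      obtain ⟨l, hl, hmem⟩ := List.mem_flatMap.mp hL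
      obtain ⟨w', hw', rfl⟩ := List.mem_map.mp hmem
      obtain ⟨_, hw'ne⟩ := List.mem_filter.mp hw'
      have hne : w' ≠ "" := bne_iff_ne.mp hw'ne
      have h1 : 1 ≤ w'.toList.length := by
        have := pv_toList_ne_nil w' hne
        cases h : w'.toList with
        | nil => exact absurd h this
        | cons a t => simp
      rw [PySem.Str.len_eq]
      exact_mod_cast h1
    · intro hne
      rw [PySem.Set.mem_ofList]
      exact List.mem_flatMap.mpr ⟨p.2, List.mem_map.mpr ⟨p, hp, rfl⟩,
        List.mem_map.mpr ⟨w, List.mem_filter.mpr ⟨hwmem, bne_iff_ne.mpr hne⟩, rfl⟩⟩
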